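-- pv_equiv track=rewrite | github.com/mortyc126-debug/SHA | ccs_v01.py | add_with_carry
-- ===== SOURCE A (Python) =====
-- MASK32 = 0xFFFFFFFF
--
-- def add_with_carry(a, b):
--     """Return (sum mod 2^32, carry vector)."""
--     s = (a + b) & MASK32
--     c = 0; cv = 0
--     for k in range(32):
--         ak=(a>>k)&1; bk=(b>>k)&1
--         c=(ak&bk)|(ak&c)|(bk&c)
--         cv|=(c<<k)
--     return s, cv
-- ===== SOURCE B (Python) =====
-- MASK32 = 0xFFFFFFFF
--
-- def add_with_carry(a, b):
--     """Return (sum mod 2^32, carry vector) without a loop.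
--
--     Each sum bit is a_k XOR b_k XOR carry_in_k, so XOR-ing the two addends
--     with the sum recovers the whole carry-in vector at once; shifting it
--     right by one turns carry-ins into carry-outs, and the final carry out
--     of bit 31 is the overflow of the 32-bit addition.
--     """
--     a &= MASK32
--     b &= MASK32
--     t = a + b
--     s = t & MASK32
--     cin = a ^ b ^ s          # bit k = carry into bit k (bit 0 is 0)
--     return s, (cin >> 1) | ((t >> 32) << 31)
-- ===== Notes on version B (the rewrite author's own statement) =====
-- stated objective: faster
-- what changed: Replaces the 32-iteration majority-carry loop by a loop-free bit-trick: the carry-in vector is recovered as (a ^ b ^ sum) masked to 32 bits, shifted right one place to turn carry-ins into carry-outs, with the bit-31 carry-out ORed in from the overall overflow.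
import Mathlib
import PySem

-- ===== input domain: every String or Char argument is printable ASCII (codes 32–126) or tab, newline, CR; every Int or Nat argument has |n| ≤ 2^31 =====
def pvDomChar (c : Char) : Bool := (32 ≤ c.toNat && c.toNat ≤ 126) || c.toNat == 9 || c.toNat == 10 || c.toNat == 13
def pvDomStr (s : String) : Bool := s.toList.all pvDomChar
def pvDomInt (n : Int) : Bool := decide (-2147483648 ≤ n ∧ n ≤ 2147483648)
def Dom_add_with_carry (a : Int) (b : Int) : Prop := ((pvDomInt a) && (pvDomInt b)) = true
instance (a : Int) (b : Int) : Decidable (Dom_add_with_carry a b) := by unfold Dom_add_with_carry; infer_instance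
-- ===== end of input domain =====

-- B replaces A's 32-iteration majority-carry loop by a loop-free XOR bit-trick (objective: faster by a constant factor; the harness could not measure per-call time).

-- ===== PORT A =====
-- the body of A's `for k in range(32)` loop, on the state (c, cv)
def awcStep (a : Int) (b : Int) (st : Int × Int) (k : Int) : Int × Int :=
  let ak := PySem.Int.band (a >>> k.toNat) 1
  let bk := PySem.Int.band (b >>> k.toNat) 1
  let c := PySem.Int.bor (PySem.Int.bor (PySem.Int.band ak bk) (PySem.Int.band ak st.1))
    (PySem.Int.band bk st.1)
  (c, PySem.Int.bor st.2 (c <<< k.toNat))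

def add_with_carry (a : Int) (b : Int) : Int × Int :=
  let s := PySem.Int.band (a + b) 4294967295
  let r := (PySem.List.pyRange 0 32 1).foldl (awcStep a b) (0, 0)
  (s, r.2)

-- ===== PORT B =====
def add_with_carry_alt (a : Int) (b : Int) : Int × Int :=
  let a' := PySem.Int.band a 4294967295
  let b' := PySem.Int.band b 4294967295
  let t := a' + b'
  let s := PySem.Int.band t 4294967295
  let cin := PySem.Int.bxor (PySem.Int.bxor a' b') s
  (s, PySem.Int.bor (cin >>> (1 : Nat)) ((t >>> (32 : Nat)) <<< (31 : Nat)))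

-- ===== PRECONDITION & SPEC =====
def Spec_add_with_carry (a : Int) (b : Int) (out : Int × Int) : Prop := out = add_with_carry_alt a b
instance (a : Int) (b : Int) (out : Int × Int) : Decidable (Spec_add_with_carry a b out) := by unfold Spec_add_with_carry; infer_instance

-- ===== CLAIM (what is proved, stated in full; the proofs are below) =====
def Claim_equal_add_with_carry : Prop := ∀ (a : Int) (b : Int), Dom_add_with_carry a b → Spec_add_with_carry a b (add_with_carry a b)

-- ===== LEMMAS AND PROOFS =====

-- carry INTO bit k of the addition of x and y
def pvCin (x y k : Nat) : Nat := (x % 2 ^ k + y % 2 ^ k) / 2 ^ k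
-- the carry vector: carries out of bits 0..n-1
def pvCv (x y n : Nat) : Nat := ∑ j ∈ Finset.range n, pvCin x y (j + 1) * 2 ^ j

theorem pvCin_le_one (x y k : Nat) : pvCin x y k ≤ 1 := by
  have h1 : x % 2 ^ k < 2 ^ k := Nat.mod_lt _ (Nat.two_pow_pos k)
  have h2 : y % 2 ^ k < 2 ^ k := Nat.mod_lt _ (Nat.two_pow_pos k)
  have : (x % 2 ^ k + y % 2 ^ k) / 2 ^ k < 2 := by
    rw [Nat.div_lt_iff_lt_mul (Nat.two_pow_pos k)]; omega
  unfold pvCin; omega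

theorem pvCv_lt (x y n : Nat) : pvCv x y n < 2 ^ n := by
  induction n with
  | zero => simp [pvCv]
  | succ n ih =>
    have h := pvCin_le_one x y (n + 1)
    unfold pvCv at *
    rw [Finset.sum_range_succ]
    have : 2 ^ (n + 1) = 2 ^ n + 2 ^ n := by ring
    nlinarith [Nat.two_pow_pos n]

-- a & 0xFFFFFFFF is a mod 2^32, also for negative a
theorem band_mask (a : Int) : PySem.Int.band a 4294967295 = a % 4294967296 := by
  unfold PySem.Int.band
  split_ifs with h1 h2
  · rw [show ((4294967295:Int).toNat) = 2 ^ 32 - 1 by rfl, Nat.and_two_pow_sub_one_eq_mod]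
    have hx : a = (a.toNat : Int) := (Int.toNat_of_nonneg h1).symm
    rw [hx]
    push_cast
    omega
  · omega
  · rw [show ((4294967295:Int).toNat) = 2 ^ 32 - 1 by rfl, Nat.and_comm, Nat.and_two_pow_sub_one_eq_mod]
    have hm : ((-a - 1).toNat : Int) = -a - 1 := Int.toNat_of_nonneg (by omega)
    have h3 : (-a-1).toNat % 2 ^ 32 < 2 ^ 32 := Nat.mod_lt _ (by norm_num)
    push_cast
    omega
  · omega

-- (a >> k) & 1 is bit k of a
theorem band_bit (a : Int) (k : Nat) : PySem.Int.band (a >>> k) 1 = a / 2 ^ k % 2 := by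
  rw [PySem.Int.band_one, PySem.Int.mod_eq_emod_of_pos (by norm_num), Int.shiftRight_eq_div_pow]
  push_cast
  rfl

-- below bit 32, the bits of a are the bits of a mod 2^32
theorem bit_residue (a : Int) (k : Nat) (hk : k < 32) :
    a / 2 ^ k % 2 = (((a % 4294967296).toNat / 2 ^ k % 2 : Nat) : Int) := by
  have hnn : (0:Int) ≤ a % 4294967296 := Int.emod_nonneg a (by norm_num)
  have hx : ((a % 4294967296).toNat : Int) = a % 4294967296 := Int.toNat_of_nonneg hnn
  set q := a / 4294967296 with hq
  set x := (a % 4294967296).toNat with hxx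
  have hpow : (2:Int) ^ k * 2 ^ (32 - k) = 4294967296 := by
    rw [← pow_add, (by omega : k + (32 - k) = 32)]; norm_num
  have key : (2:Int) ^ k * (q * 2 ^ (32 - k)) = 4294967296 * q := by
    rw [show (4294967296:Int) = 2 ^ k * 2 ^ (32 - k) from hpow.symm]; ring
  have ha : a = ↑x + 2 ^ k * (q * 2 ^ (32 - k)) := by rw [hx, key]; omega
  rw [ha, Int.add_mul_ediv_left _ _ (by positivity)]
  have h32k : q * 2 ^ (32 - k) = 2 * (q * 2 ^ (32 - k - 1)) := by
    rw [show (2:Int) ^ (32 - k) = 2 * 2 ^ (32 - k - 1) from by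
      rw [← pow_succ', (by omega : (32 - k - 1) + 1 = 32 - k)]]
    ring
  rw [h32k, Int.add_mul_emod_self_left]
  push_cast
  rfl

-- the majority expression of A's loop is (p+q+r)/2 on bits
theorem maj_or (p q r : Int) (hp : p = 0 ∨ p = 1) (hq : q = 0 ∨ q = 1) (hr : r = 0 ∨ r = 1) :
    PySem.Int.bor (PySem.Int.bor (PySem.Int.band p q) (PySem.Int.band p r)) (PySem.Int.band q r)
      = (p + q + r) / 2 := by
  rcases hp with hp | hp <;> rcases hq with hq | hq <;> rcases hr with hr | hr <;>
    subst hp <;> subst hq <;> subst hr <;> decide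

-- OR-ing a bit above everything already accumulated is addition
theorem lor_small (u c k : Nat) (hu : u < 2 ^ k) (hc : c ≤ 1) :
    u ||| (c <<< k) = u + c * 2 ^ k := by
  interval_cases c
  · simp
  · rw [Nat.shiftLeft_eq]
    apply Nat.eq_of_testBit_eq
    intro i
    have h2 : u + 2 ^ k = 2 ^ k * 1 + u := by ring
    simp only [one_mul]
    rw [h2, Nat.testBit_lor, Nat.testBit_two_pow_mul_add 1 hu]
    by_cases hik : i < k
    · simp [Nat.testBit_two_pow, hik]
      exact fun h => absurd h (by omega)
    · have h3 : u.testBit i = false := Nat.testBit_lt_two_pow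
        (lt_of_lt_of_le hu (Nat.pow_le_pow_right (by norm_num) (by omega)))
      rcases Nat.eq_or_lt_of_le (Nat.le_of_not_lt hik) with h | h
      · simp [h.symm]
      · have h4 : Nat.testBit 1 (i - k) = false := by
          rw [show (1:ℕ) = 2 ^ 0 from rfl, Nat.testBit_two_pow]
          simp; omega
        simp [Nat.testBit_two_pow, h3, hik, h4]
        omega

theorem pvDivHelper (m r E : Nat) (hE : 0 < E) (hr : r < E) : (m * E + r) / (2 * E) = m / 2 := by
  have hm : m = 2 * (m / 2) + m % 2 := (Nat.div_add_mod m 2).symm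
  have hs : m % 2 ≤ 1 := by omega
  have h1 : m * E + r = (m % 2 * E + r) + (m / 2) * (2 * E) := by
    conv_lhs => rw [hm]
    ring
  have h2 : m % 2 * E ≤ 1 * E := Nat.mul_le_mul_right E hs
  rw [h1, Nat.add_mul_div_right _ _ (by omega), Nat.div_eq_of_lt (by omega)]
  omega

-- carry recurrence: carry out of bit k from the two bits and the carry in
theorem step_div (x y k : Nat) :
    (x / 2 ^ k % 2 + y / 2 ^ k % 2 + pvCin x y k) / 2 = pvCin x y (k + 1) := by
  unfold pvCin
  have hE : 0 < 2 ^ k := Nat.two_pow_pos k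
  have hx : x % 2 ^ (k + 1) = x % 2 ^ k + 2 ^ k * (x / 2 ^ k % 2) := Nat.mod_pow_succ
  have hy : y % 2 ^ (k + 1) = y % 2 ^ k + 2 ^ k * (y / 2 ^ k % 2) := Nat.mod_pow_succ
  have hq := Nat.div_add_mod (x % 2 ^ k + y % 2 ^ k) (2 ^ k)
  set c := (x % 2 ^ k + y % 2 ^ k) / 2 ^ k with hc
  set rr := (x % 2 ^ k + y % 2 ^ k) % 2 ^ k with hrr
  have hrlt : rr < 2 ^ k := Nat.mod_lt _ hE
  have hnum : x % 2 ^ (k + 1) + y % 2 ^ (k + 1)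
      = (x / 2 ^ k % 2 + y / 2 ^ k % 2 + c) * 2 ^ k + rr := by
    have e1 : (x / 2 ^ k % 2 + y / 2 ^ k % 2 + c) * 2 ^ k
        = 2 ^ k * (x / 2 ^ k % 2) + 2 ^ k * (y / 2 ^ k % 2) + 2 ^ k * c := by ring
    rw [hx, hy, e1]; omega
  rw [hnum, pow_succ, (by ring : (2:ℕ) ^ k * 2 = 2 * 2 ^ k), pvDivHelper _ _ _ hE hrlt]

-- sum bit: bit k of x+y is the parity of the two bits plus the carry in
theorem step_mod (x y k : Nat) :
    (x + y) / 2 ^ k % 2 = (x / 2 ^ k % 2 + y / 2 ^ k % 2 + pvCin x y k) % 2 := by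
  unfold pvCin
  have hE : 0 < 2 ^ k := Nat.two_pow_pos k
  have hxd := Nat.div_add_mod x (2 ^ k)
  have hyd := Nat.div_add_mod y (2 ^ k)
  have h2 : x + y = (x % 2 ^ k + y % 2 ^ k) + (x / 2 ^ k + y / 2 ^ k) * 2 ^ k := by
    rw [Nat.add_mul, Nat.mul_comm (x / 2 ^ k), Nat.mul_comm (y / 2 ^ k)]; omega
  rw [h2, Nat.add_mul_div_right _ _ hE]
  omega

-- bit j of x ^ y ^ (x+y) is the carry into bit j
theorem xorBit (x y j : Nat) : (x ^^^ y ^^^ (x + y)) / 2 ^ j % 2 = pvCin x y j := by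
  have hc := pvCin_le_one x y j
  have hbz : (x ^^^ y ^^^ (x + y)) / 2 ^ j % 2 ≤ 1 := by omega
  have hb : (x ^^^ y ^^^ (x + y)).testBit j
      = ((x.testBit j ^^ y.testBit j) ^^ (x + y).testBit j) := by
    rw [Nat.testBit_xor, Nat.testBit_xor]
  rw [Nat.testBit_eq_decide_div_mod_eq, Nat.testBit_eq_decide_div_mod_eq,
    Nat.testBit_eq_decide_div_mod_eq, Nat.testBit_eq_decide_div_mod_eq, step_mod x y j] at hb
  rcases (by omega : x / 2 ^ j % 2 = 0 ∨ x / 2 ^ j % 2 = 1) with h1 | h1 <;>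
    rcases (by omega : y / 2 ^ j % 2 = 0 ∨ y / 2 ^ j % 2 = 1) with h2 | h2 <;>
    rcases (by omega : pvCin x y j = 0 ∨ pvCin x y j = 1) with h3 | h3 <;>
    rw [h1, h2, h3] at hb <;> simp at hb <;> omega

-- the XOR trick: x ^ y ^ (x+y) is the whole carry-in vector
theorem xor_sum_mod (x y k : Nat) :
    (x ^^^ y ^^^ (x + y)) % 2 ^ (k + 1) = 2 * pvCv x y k := by
  induction k with
  | zero =>
    have h := xorBit x y 0
    simp [pvCin] at h
    simp [pvCv]
    omega
  | succ k ih =>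
    have hm : (x ^^^ y ^^^ (x + y)) % 2 ^ (k + 1 + 1)
        = (x ^^^ y ^^^ (x + y)) % 2 ^ (k + 1)
          + 2 ^ (k + 1) * ((x ^^^ y ^^^ (x + y)) / 2 ^ (k + 1) % 2) := Nat.mod_pow_succ
    rw [hm, ih, xorBit x y (k + 1)]
    unfold pvCv
    rw [Finset.sum_range_succ]
    ring

-- masking the sum before the XOR only clears bits ≥ 32
theorem xor_masked (x y : Nat) (hx : x < 2 ^ 32) (hy : y < 2 ^ 32) :
    x ^^^ y ^^^ ((x + y) % 2 ^ 32) = (x ^^^ y ^^^ (x + y)) % 2 ^ 32 := by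
  apply Nat.eq_of_testBit_eq
  intro i
  rw [Nat.testBit_xor, Nat.testBit_xor, Nat.testBit_mod_two_pow, Nat.testBit_mod_two_pow,
    Nat.testBit_xor, Nat.testBit_xor]
  by_cases hi : i < 32
  · simp [hi]
  · have h1 : x.testBit i = false := Nat.testBit_lt_two_pow
      (lt_of_lt_of_le hx (Nat.pow_le_pow_right (by norm_num) (by omega)))
    have h2 : y.testBit i = false := Nat.testBit_lt_two_pow
      (lt_of_lt_of_le hy (Nat.pow_le_pow_right (by norm_num) (by omega)))
    simp [hi, h1, h2]

-- A's loop invariant: after n iterations c is the carry out of bit n-1 and cv the carries so far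
theorem loopA (a b : Int) (n : Nat) (hn : n ≤ 32) :
    (PySem.List.pyRange 0 (n : Int) 1).foldl (awcStep a b) (0, 0)
      = ((pvCin (a % 4294967296).toNat (b % 4294967296).toNat n : Int),
         (pvCv (a % 4294967296).toNat (b % 4294967296).toNat n : Int)) := by
  set x := (a % 4294967296).toNat with hxdef
  set y := (b % 4294967296).toNat with hydef
  induction n with
  | zero => simp [PySem.List.pyRange, pvCin, pvCv]
  | succ n ih =>
    have hn' : n ≤ 32 := by omega
    have hlt : n < 32 := by omega
    have hsplit : PySem.List.pyRange 0 ((n + 1 : Nat) : Int) 1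
        = PySem.List.pyRange 0 (n : Int) 1 ++ [(n : Int)] := by
      push_cast
      exact PySem.List.pyRange_one_succ_right (by positivity)
    rw [hsplit, List.foldl_append, ih hn']
    show awcStep a b _ _ = _
    unfold awcStep
    simp only [Int.toNat_natCast]
    rw [band_bit a n, band_bit b n, bit_residue a n hlt, bit_residue b n hlt]
    have hbx : x / 2 ^ n % 2 ≤ 1 := by omega
    have hby : y / 2 ^ n % 2 ≤ 1 := by omega
    have hcc := pvCin_le_one x y n
    rw [maj_or _ _ _ (by omega) (by omega) (by omega)]
    have hdiv : ((x / 2 ^ n % 2 : Nat) : Int) + ((y / 2 ^ n % 2 : Nat) : Int) + ((pvCin x y n : Nat) : Int)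
        = ((x / 2 ^ n % 2 + y / 2 ^ n % 2 + pvCin x y n : Nat) : Int) := by push_cast; ring
    rw [hdiv, show ((x / 2 ^ n % 2 + y / 2 ^ n % 2 + pvCin x y n : Nat) : Int) / 2
        = ((x / 2 ^ n % 2 + y / 2 ^ n % 2 + pvCin x y n : Nat) / 2 : Nat) from by
      rw [Int.natCast_div]; push_cast; ring, step_div x y n]
    have hshift : ((pvCin x y (n + 1) : Nat) : Int) <<< n = ((pvCin x y (n + 1) <<< n : Nat) : Int) := by
      rw [Int.shiftLeft_eq, Nat.shiftLeft_eq]; push_cast; ring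
    rw [hshift, PySem.Int.bor_natCast, lor_small _ _ _ (pvCv_lt x y n) (pvCin_le_one x y (n + 1))]
    have hcv : pvCv x y n + pvCin x y (n + 1) * 2 ^ n = pvCv x y (n + 1) := by
      unfold pvCv; rw [Finset.sum_range_succ]
    rw [hcv]

-- evaluation of port B through the XOR characterisation of the carries
theorem portB_eval (x y : Nat) (hxlt : x < 2 ^ 32) (hylt : y < 2 ^ 32) (a b : Int)
    (hxa : (x : Int) = a % 4294967296) (hya : (y : Int) = b % 4294967296) :
    add_with_carry_alt a b = ((((x + y) % 2 ^ 32 : Nat) : Int), ((pvCv x y 32 : Nat) : Int)) := by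
  have hsN : PySem.Int.band ((x : Int) + (y : Int)) 4294967295 = (((x + y) % 2 ^ 32 : Nat) : Int) := by
    rw [band_mask, show ((4294967296:Int)) = ((2 ^ 32 : Nat) : Int) from by norm_num,
      show ((x:Int) + y) = ((x + y : Nat) : Int) from by push_cast; ring, ← Int.natCast_mod]
  simp only [add_with_carry_alt]
  rw [band_mask a, band_mask b, ← hxa, ← hya, hsN]
  refine congrArg₂ Prod.mk rfl ?_
  rw [PySem.Int.bxor_natCast, PySem.Int.bxor_natCast, xor_masked x y hxlt hylt]
  have hcin : (x ^^^ y ^^^ (x + y)) % 2 ^ 32 = 2 * pvCv x y 31 := xor_sum_mod x y 31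
  rw [hcin]
  have hshr : ((2 * pvCv x y 31 : Nat) : Int) >>> (1:Nat) = ((pvCv x y 31 : Nat) : Int) := by
    rw [Int.shiftRight_eq_div_pow]
    push_cast
    omega
  have htshr : ((x : Int) + (y : Int)) >>> (32:Nat) = ((pvCin x y 32 : Nat) : Int) := by
    rw [Int.shiftRight_eq_div_pow]
    have h1 : (x : Int) + (y : Int) = ((x + y : Nat) : Int) := by push_cast; ring
    rw [h1, ← Int.natCast_div]
    congr 1
    unfold pvCin
    rw [Nat.mod_eq_of_lt hxlt, Nat.mod_eq_of_lt hylt]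
  rw [hshr, htshr]
  have hshl : ((pvCin x y 32 : Nat) : Int) <<< (31:Nat) = ((pvCin x y 32 <<< (31:Nat) : Nat) : Int) := by
    rw [Int.shiftLeft_eq, Nat.shiftLeft_eq]; push_cast; ring
  rw [hshl, PySem.Int.bor_natCast,
    lor_small _ _ _ (pvCv_lt x y 31) (pvCin_le_one x y 32)]
  have h2 : pvCv x y 32 = pvCv x y 31 + pvCin x y 32 * 2 ^ 31 :=
    Finset.sum_range_succ (fun j => pvCin x y (j + 1) * 2 ^ j) 31
  rw [← h2]

theorem add_with_carry_eq (a b : Int) : add_with_carry a b = add_with_carry_alt a b := by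
  obtain ⟨x, hxa⟩ : ∃ x : Nat, (x : Int) = a % 4294967296 :=
    ⟨(a % 4294967296).toNat, Int.toNat_of_nonneg (Int.emod_nonneg a (by norm_num))⟩
  obtain ⟨y, hya⟩ : ∃ y : Nat, (y : Int) = b % 4294967296 :=
    ⟨(b % 4294967296).toNat, Int.toNat_of_nonneg (Int.emod_nonneg b (by norm_num))⟩
  have hx' : (a % 4294967296).toNat = x := by rw [← hxa, Int.toNat_natCast]
  have hy' : (b % 4294967296).toNat = y := by rw [← hya, Int.toNat_natCast]
  have hxlt : x < 2 ^ 32 := by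
    have := Int.emod_lt_of_pos a (show (0:Int) < 4294967296 by norm_num)
    omega
  have hylt : y < 2 ^ 32 := by
    have := Int.emod_lt_of_pos b (show (0:Int) < 4294967296 by norm_num)
    omega
  have hA : add_with_carry a b = ((a + b) % 4294967296, ((pvCv x y 32 : Nat) : Int)) := by
    simp only [add_with_carry]
    rw [band_mask, show (32 : Int) = ((32 : Nat) : Int) from by norm_num,
      loopA a b 32 (by omega), hx', hy']
  rw [hA, portB_eval x y hxlt hylt a b hxa hya]
  congr 1
  rw [Int.add_emod a b, ← hxa, ← hya,
    show ((x:Int) + y) = ((x + y : Nat) : Int) from by push_cast; ring,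
    show ((4294967296:Int)) = ((2 ^ 32 : Nat) : Int) from by norm_num, ← Int.natCast_mod]

-- ===== VERDICT (by name: the statement is the Claim_ definition above) =====
theorem add_with_carry_spec : Claim_equal_add_with_carry :=
  fun a b _ => add_with_carry_eq a b
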